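-- pv_equiv track=rewrite | github.com/KaushalMorankar/IITH-GPT | codes_for_whole_data/embed.py | find_split_index
-- ===== SOURCE A (Python) =====
-- def find_split_index(text, min_words):
--     words = text.split()
--
--     # Return -1 if the sentence has fewer words than the minimum threshold
--     if len(words) < min_words:
--         return -1
--
--     # Find the split point at the nearest punctuation
--     for i in range(min_words, len(words)):
--         if words[i].endswith(('.', '!', '?')):
--             return len(' '.join(words[:i + 1]))
--
--     # If no punctuation is found, do not split
--     return -1
-- ===== SOURCE B (Python) =====
-- def find_split_index(text, min_words):
--     words = text.split()
--     if len(words) < min_words: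
--         return -1
--     acc = 0
--     for i, w in enumerate(words):
--         if i:
--             acc += 1
--         acc += len(w)
--         if i >= min_words and w.endswith(('.', '!', '?')):
--             return acc
--     return -1
-- ===== Notes on version B (the rewrite author's own statement) =====
-- stated objective: alternative
-- what changed: B maintains a running character offset while enumerating the words once, instead of A's re-joining of the word prefix at return time; so B does O(1) extra work at the match point where A rebuilds the prefix string.
-- outside the precondition, e.g. on find_split_index('x y.', -1): A returns 0, B returns 4
import Mathlib
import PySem

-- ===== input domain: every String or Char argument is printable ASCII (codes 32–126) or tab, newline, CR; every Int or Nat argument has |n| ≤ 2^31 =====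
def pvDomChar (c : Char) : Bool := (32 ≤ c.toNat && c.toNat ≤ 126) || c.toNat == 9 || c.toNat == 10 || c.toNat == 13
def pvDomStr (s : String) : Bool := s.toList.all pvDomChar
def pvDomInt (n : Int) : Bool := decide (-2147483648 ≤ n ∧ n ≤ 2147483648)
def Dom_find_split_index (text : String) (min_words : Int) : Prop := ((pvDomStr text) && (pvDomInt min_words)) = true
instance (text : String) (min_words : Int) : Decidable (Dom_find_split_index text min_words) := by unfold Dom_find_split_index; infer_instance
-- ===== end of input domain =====

-- B replaces A's "re-join the word prefix at the match" by a single enumerate pass that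
-- maintains a running character offset (alternative decomposition, same asymptotic cost).


-- ===== PORT A =====
-- words[i].endswith(('.', '!', '?'))  (the same expression occurs verbatim in both Pythons)
def pvEndsSent (w : String) : Bool :=
  PySem.Str.endswith w "." || PySem.Str.endswith w "!" || PySem.Str.endswith w "?"

-- A's "for i in range(min_words, len(words)): …"
def pvLoopA (words : List String) : List Int → Int
  | [] => -1
  | i :: rest =>
    match PySem.List.pyGet? words i with
    | none => -1   -- Python raises IndexError here; such inputs are outside Pre_
    | some w =>
      if pvEndsSent w then
        PySem.Str.len (PySem.Str.join " " (PySem.List.slice words none (some (i + 1))))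
      else pvLoopA words rest

def find_split_index (text : String) (min_words : Int) : Int :=
  let words := PySem.Str.split₀ text
  if (words.length : Int) < min_words then -1
  else pvLoopA words (PySem.List.pyRange min_words (words.length : Int))

-- ===== PORT B =====
-- B's "for i, w in enumerate(words): …" with the running offset acc
def pvLoopB (min_words : Int) : List (Int × String) → Int → Int
  | [], _ => -1
  | (i, w) :: rest, acc =>
    let acc1 := if i ≠ 0 then acc + 1 else acc
    let acc2 := acc1 + PySem.Str.len w
    if min_words ≤ i && pvEndsSent w then acc2
    else pvLoopB min_words rest acc2

def find_split_index_alt (text : String) (min_words : Int) : Int :=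
  let words := PySem.Str.split₀ text
  if (words.length : Int) < min_words then -1
  else pvLoopB min_words (PySem.List.enumerate words) 0

-- ===== PRECONDITION & SPEC =====
-- Pre_ excludes negative min_words: a negative word count is outside the task's natural domain,
-- and there A indexes `words` with negative indices (Python wraparound from the end, or IndexError).
def Pre_find_split_index (text : String) (min_words : Int) : Prop := 0 ≤ min_words
instance (text : String) (min_words : Int) : Decidable (Pre_find_split_index text min_words) := by
  unfold Pre_find_split_index; infer_instance

def pvWitness_find_split_index : String × Int := ("hello world. more", 1)

def Spec_find_split_index (text : String) (min_words : Int) (out : Int) : Prop :=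
  out = find_split_index_alt text min_words
instance (text : String) (min_words : Int) (out : Int) : Decidable (Spec_find_split_index text min_words out) := by
  unfold Spec_find_split_index; infer_instance

-- ===== CLAIM (what is proved, stated in full; the proofs are below) =====
def Claim_equal_find_split_index : Prop := ∀ (text : String) (min_words : Int), Dom_find_split_index text min_words → Pre_find_split_index text min_words → Spec_find_split_index text min_words (find_split_index text min_words)

-- ===== LEMMAS AND PROOFS =====

-- length of sep.join(l ++ [c]) from length of sep.join(l)
lemma pv_lenJoin_append (sep : List Char) (l : List (List Char)) (c : List Char) :
    (PySem.Chars.join sep (l ++ [c])).length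
      = (PySem.Chars.join sep l).length + (if l = [] then 0 else sep.length) + c.length := by
  induction l with
  | nil => simp [PySem.Chars.join_nil, PySem.Chars.join_singleton]
  | cons a tl ih =>
    cases tl with
    | nil =>
      simp [PySem.Chars.join_cons_cons, PySem.Chars.join_singleton]; omega
    | cons b tl' =>
      simp only [List.cons_append, PySem.Chars.join_cons_cons] at *
      simp [ih]; omega

-- the running offset: length of ' '.join(words[:k])
def pvJ (words : List String) (k : Nat) : Int :=
  PySem.Str.len (PySem.Str.join " " (words.take k))

lemma pvJ_zero (words : List String) : pvJ words 0 = 0 := by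
  simp [pvJ, PySem.Str.len_eq, PySem.Str.toList_join, PySem.Chars.join_nil]

lemma pvJ_succ (words : List String) (k : Nat) (hk : k < words.length) :
    pvJ words (k + 1)
      = (if (k : Int) ≠ 0 then pvJ words k + 1 else pvJ words k) + PySem.Str.len (words[k]) := by
  have htake : words.take (k + 1) = words.take k ++ [words[k]] := by
    rw [List.take_add_one, List.getElem?_eq_getElem hk]; rfl
  rw [pvJ, pvJ, htake]
  simp only [PySem.Str.len_eq, PySem.Str.toList_join, List.map_append, List.map_cons, List.map_nil]
  rw [pv_lenJoin_append]
  rcases Nat.eq_zero_or_pos k with h0 | h0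
  · subst h0; simp
  · have hne : ¬ ((words.take k).map String.toList = []) := by
      simp only [List.map_eq_nil_iff]
      intro h
      rcases List.take_eq_nil_iff.mp h with h | h
      · omega
      · subst h; simp at hk
    rw [if_neg hne]
    have : (k : Int) ≠ 0 := by exact_mod_cast Nat.pos_iff_ne_zero.mp h0
    rw [if_pos this]
    have : (" ".toList).length = 1 := rfl
    rw [this]
    push_cast; ring

-- the matching phase: from any j with min_words <= j the two loops agree
lemma pv_match (words : List String) (mw : Int) (hmw : 0 ≤ mw) :
    ∀ d j, words.length - j = d → mw.toNat ≤ j → j ≤ words.length →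
      pvLoopB mw (PySem.List.enumerate (words.drop j) (j : Int)) (pvJ words j)
        = pvLoopA words (PySem.List.pyRange (j : Int) (words.length : Int)) := by
  intro d
  induction d with
  | zero =>
    intro j hd _ hle
    have hj : j = words.length := by omega
    subst hj
    rw [List.drop_length, PySem.List.pyRange_one_eq_nil (by omega)]
    simp [pvLoopB, pvLoopA, PySem.List.enumerate]
  | succ d ih =>
    intro j hd hmwj hle
    have hj : j < words.length := by omega
    rw [List.drop_eq_getElem_cons hj, PySem.List.enumerate_cons,
        PySem.List.pyRange_one_cons (by exact_mod_cast hj)]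
    rw [pvLoopB, pvLoopA]
    rw [PySem.List.pyGet?_natCast, List.getElem?_eq_getElem hj]
    simp only
    have hcond : decide (mw ≤ (j : Int)) = true := decide_eq_true (by omega)
    have hacc2 :
        (if (j : Int) ≠ 0 then pvJ words j + 1 else pvJ words j) + PySem.Str.len (words[j])
          = pvJ words (j + 1) := (pvJ_succ words j hj).symm
    have hcast : (j : Int) + 1 = ((j + 1 : Nat) : Int) := by push_cast; ring
    by_cases hp : pvEndsSent words[j] = true
    · simp only [hp, hcond, Bool.and_self, if_pos]
      rw [hacc2, hcast, PySem.List.slice_to_natCast]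
      rfl
    · rw [Bool.not_eq_true] at hp
      simp only [hp, hcond, Bool.and_false, Bool.false_eq_true, if_false]
      rw [hacc2, hcast]
      exact ih (j + 1) (by omega) (by omega) (by omega)

-- the skipping phase: below min_words B only accumulates
lemma pv_skip (words : List String) (mw : Int) (hmw : 0 ≤ mw) (hn : mw.toNat ≤ words.length) :
    ∀ d j, mw.toNat - j = d → j ≤ mw.toNat →
      pvLoopB mw (PySem.List.enumerate (words.drop j) (j : Int)) (pvJ words j)
        = pvLoopB mw (PySem.List.enumerate (words.drop mw.toNat) ((mw.toNat : Nat) : Int))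
            (pvJ words mw.toNat) := by
  intro d
  induction d with
  | zero =>
    intro j hd hle
    have : j = mw.toNat := by omega
    subst this; rfl
  | succ d ih =>
    intro j hd hle
    have hj : j < mw.toNat := by omega
    have hjn : j < words.length := by omega
    rw [List.drop_eq_getElem_cons hjn, PySem.List.enumerate_cons, pvLoopB]
    have hcond : decide (mw ≤ (j : Int)) = false := decide_eq_false (by omega)
    simp only [hcond, Bool.false_and, Bool.false_eq_true, if_false]
    rw [(pvJ_succ words j hjn).symm]
    have hcast : (j : Int) + 1 = ((j + 1 : Nat) : Int) := by push_cast; ring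
    rw [hcast]
    exact ih (j + 1) (by omega) (by omega)

-- ===== VERDICT (by name: the statement is the Claim_ definition above) =====
theorem find_split_index_spec : Claim_equal_find_split_index := by
  intro text mw _ hpre
  unfold Spec_find_split_index find_split_index find_split_index_alt
  simp only
  set words := PySem.Str.split₀ text with hw
  by_cases hlt : (words.length : Int) < mw
  · rw [if_pos hlt, if_pos hlt]
  · rw [if_neg hlt, if_neg hlt]
    have hmw : (0:Int) ≤ mw := hpre
    have hn : mw.toNat ≤ words.length := by omega
    have h0 := pv_skip words mw hmw hn mw.toNat 0 (by omega) (by omega)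
    rw [List.drop_zero, pvJ_zero] at h0
    have h1 := pv_match words mw hmw (words.length - mw.toNat) mw.toNat rfl (le_refl _) (by omega)
    have hcast : ((mw.toNat : Nat) : Int) = mw := by omega
    rw [hcast] at h0 h1
    simp only [Nat.cast_zero] at h0
    exact (h0.trans h1).symm
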